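-- pv_equiv track=rewrite | github.com/peterarriz/livability-risk-engine | backend/ingest/anchorage_crime_trends.py | _sum_months
-- ===== SOURCE A (Python) =====
-- def _month_key(year: int, month: int) -> str:
--     """Return MM-YYYY string used by the FBI CDE API."""
--     return f"{month:02d}-{year}"
--
-- def _sum_months(
--     monthly: dict[str, int | None],
--     year_start: int,
--     month_start: int,
--     year_end: int,
--     month_end: int,
-- ) -> int:
--     """Sum monthly counts for a date range [start, end] inclusive."""
--     total = 0
--     y, m = year_start, month_start
--     while (y, m) <= (year_end, month_end):
--         key = _month_key(y, m)
--         val = monthly.get(key)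
--         if val is not None:
--             total += int(val)
--         m += 1
--         if m > 12:
--             m = 1
--             y += 1
--     return total
-- ===== SOURCE B (Python) =====
-- def _sum_months(
--     monthly: dict[str, int | None],
--     year_start: int,
--     month_start: int,
--     year_end: int,
--     month_end: int,
-- ) -> int:
--     """Sum monthly counts for [start, end] inclusive, by year segments."""
--     def val(y: int, m: int) -> int:
--         v = monthly.get(f"{m:02d}-{y}")
--         return int(v) if v is not None else 0
--     if (year_start, month_start) > (year_end, month_end):
--         return 0
--     if year_start == year_end:
--         return sum(val(year_start, m) for m in range(month_start, month_end + 1))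
--     total = sum(val(year_start, m) for m in range(month_start, 13))
--     for y in range(year_start + 1, year_end):
--         total += sum(val(y, m) for m in range(1, 13))
--     total += sum(val(year_end, m) for m in range(1, month_end + 1))
--     return total
-- ===== Notes on version B (the rewrite author's own statement) =====
-- stated objective: alternative
-- what changed: A simulates the calendar with one while-loop over a mutable (year, month) state that wraps month 12 into the next year; B has no wraparound state: it splits the inclusive range in closed form into a first-year segment, full middle years, and a last-year segment, each summed with a plain range(). Pre_ excludes month arguments greater than 12 (malformed calendar months, outside the task's natural domain), where A's wrap-at-12 loop yields accidental values: it processes an out-of-range month_start once before wrapping and silently caps the last year at month 12.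
-- outside the precondition, e.g. on _sum_months({'13-2020': 5}, 2020, 13, 2021, 1): A returns 5, B returns 0; on _sum_months({'13-2020': 5}, 2020, 1, 2020, 13): A returns 0, B returns 5
import Mathlib
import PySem

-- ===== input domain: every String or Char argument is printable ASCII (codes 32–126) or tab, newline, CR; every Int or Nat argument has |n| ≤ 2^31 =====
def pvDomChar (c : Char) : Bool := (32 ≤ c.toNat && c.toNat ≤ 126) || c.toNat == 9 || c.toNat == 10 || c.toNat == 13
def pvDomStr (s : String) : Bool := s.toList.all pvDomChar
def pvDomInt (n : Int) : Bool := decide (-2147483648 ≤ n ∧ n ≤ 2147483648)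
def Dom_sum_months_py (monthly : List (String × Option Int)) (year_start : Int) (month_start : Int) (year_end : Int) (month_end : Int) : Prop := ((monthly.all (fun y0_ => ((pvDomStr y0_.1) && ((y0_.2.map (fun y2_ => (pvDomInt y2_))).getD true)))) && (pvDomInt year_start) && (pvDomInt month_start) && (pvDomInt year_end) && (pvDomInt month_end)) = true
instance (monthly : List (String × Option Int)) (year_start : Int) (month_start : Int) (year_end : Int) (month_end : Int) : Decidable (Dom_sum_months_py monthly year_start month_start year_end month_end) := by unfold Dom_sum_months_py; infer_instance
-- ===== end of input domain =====

-- B replaces A's wraparound while-loop over calendar months by a closed-form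
-- decomposition into first-year / full middle years / last-year range sums (alternative).


-- ===== PORT A =====
-- _month_key: f"{month:02d}-{year}"; the 02d padding is exact here because a '0' is
-- prepended exactly when str(month) has a single character (no sign involved then).
def monthKey (year month : Int) : String :=
  let mcs := PySem.Int.toChars month
  String.ofList ((if mcs.length < 2 then '0' :: mcs else mcs) ++ '-' :: PySem.Int.toChars year)

-- the while-loop of _sum_months, state (total, y, m); '(y, m) <= (year_end, month_end)'
-- is Python's tuple comparison written out. The fuel argument only makes the loop
-- structurally recursive: (year_end + 1 - y).toNat * 14 + (13 - m).toNat strictly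
-- decreases at every iteration (used in sumMonthsLoop_eq_segSum below), so with the
-- initial fuel of sum_months_py the 0-case is never reached.
def sumMonthsLoop (monthly : List (String × Option Int)) (year_end month_end : Int) :
    Nat → Int → Int → Int → Int
  | 0, total, _, _ => total
  | fuel + 1, total, y, m =>
    if y < year_end ∨ (y = year_end ∧ m ≤ month_end) then
      let total' :=
        match (PySem.Dict.mk monthly).get? (monthKey y m) with
        | some (some v) => total + v
        | _ => total
      if m + 1 > 12 then
        sumMonthsLoop monthly year_end month_end fuel total' (y + 1) 1
      else
        sumMonthsLoop monthly year_end month_end fuel total' y (m + 1)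
    else total

def sum_months_py (monthly : List (String × Option Int)) (year_start : Int) (month_start : Int) (year_end : Int) (month_end : Int) : Int :=
  sumMonthsLoop monthly year_end month_end
    ((year_end + 1 - year_start).toNat * 14 + (13 - month_start).toNat)
    0 year_start month_start

-- ===== PORT B =====
-- val(y, m): monthly.get(f"{m:02d}-{y}"), None (absent or stored None) counted as 0
def altVal (monthly : List (String × Option Int)) (y m : Int) : Int :=
  match (PySem.Dict.mk monthly).get? (monthKey y m) with
  | some (some v) => v
  | _ => 0

-- sum(val(y, m) for m in range(a, b))
def altYearSum (monthly : List (String × Option Int)) (y a b : Int) : Int :=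
  ((PySem.List.pyRange a b 1).map (altVal monthly y)).sum

def sum_months_py_alt (monthly : List (String × Option Int)) (year_start : Int) (month_start : Int) (year_end : Int) (month_end : Int) : Int :=
  if year_start > year_end ∨ (year_start = year_end ∧ month_start > month_end) then 0
  else if year_start = year_end then
    altYearSum monthly year_start month_start (month_end + 1)
  else
    let first := altYearSum monthly year_start month_start 13
    let mid := (PySem.List.pyRange (year_start + 1) year_end 1).foldl
      (fun t y => t + altYearSum monthly y 1 13) first
    mid + altYearSum monthly year_end 1 (month_end + 1)

-- ===== PRECONDITION & SPEC =====
-- Pre_ excludes month arguments greater than 12 (malformed calendar months, outside the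
-- task's natural domain), where A's wrap-at-12 loop yields accidental values: it processes
-- an out-of-range month_start once before wrapping and silently caps the last year at 12.
def Pre_sum_months_py (monthly : List (String × Option Int)) (year_start : Int) (month_start : Int) (year_end : Int) (month_end : Int) : Prop :=
  month_start ≤ 12 ∧ month_end ≤ 12
instance (monthly : List (String × Option Int)) (year_start : Int) (month_start : Int) (year_end : Int) (month_end : Int) : Decidable (Pre_sum_months_py monthly year_start month_start year_end month_end) := by unfold Pre_sum_months_py; infer_instance

def pvWitness_sum_months_py : (List (String × Option Int)) × Int × Int × Int × Int :=
  ([("01-2020", some 5), ("03-2020", none)], 2020, 1, 2020, 3)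

def Spec_sum_months_py (monthly : List (String × Option Int)) (year_start : Int) (month_start : Int) (year_end : Int) (month_end : Int) (out : Int) : Prop := out = sum_months_py_alt monthly year_start month_start year_end month_end
instance (monthly : List (String × Option Int)) (year_start : Int) (month_start : Int) (year_end : Int) (month_end : Int) (out : Int) : Decidable (Spec_sum_months_py monthly year_start month_start year_end month_end out) := by unfold Spec_sum_months_py; infer_instance

-- ===== CLAIM (what is proved, stated in full; the proofs are below) =====
def Claim_equal_sum_months_py : Prop := ∀ (monthly : List (String × Option Int)) (year_start : Int) (month_start : Int) (year_end : Int) (month_end : Int), Dom_sum_months_py monthly year_start month_start year_end month_end → Pre_sum_months_py monthly year_start month_start year_end month_end → Spec_sum_months_py monthly year_start month_start year_end month_end (sum_months_py monthly year_start month_start year_end month_end)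

-- ===== LEMMAS AND PROOFS =====

theorem pvWitness_ok : Dom_sum_months_py (pvWitness_sum_months_py.1) (pvWitness_sum_months_py.2.1) (pvWitness_sum_months_py.2.2.1) (pvWitness_sum_months_py.2.2.2.1) (pvWitness_sum_months_py.2.2.2.2) ∧ Pre_sum_months_py (pvWitness_sum_months_py.1) (pvWitness_sum_months_py.2.1) (pvWitness_sum_months_py.2.2.1) (pvWitness_sum_months_py.2.2.2.1) (pvWitness_sum_months_py.2.2.2.2) := by
  constructor <;> decide

theorem pyRange_nil {a b : Int} (h : b ≤ a) : PySem.List.pyRange a b 1 = [] := by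
  rw [PySem.List.pyRange_one]
  have : (b - a).toNat = 0 := by omega
  simp [this]

-- the remaining-range sum, as B computes it, for a loop state (y, m)
def segSum (monthly : List (String × Option Int)) (year_end month_end y m : Int) : Int :=
  if y < year_end then
    altYearSum monthly y m 13
      + ((PySem.List.pyRange (y + 1) year_end 1).map
          (fun y' => altYearSum monthly y' 1 13)).sum
      + altYearSum monthly year_end 1 (month_end + 1)
  else if y = year_end ∧ m ≤ month_end then
    altYearSum monthly y m (month_end + 1)
  else 0

theorem altYearSum_cons (monthly : List (String × Option Int)) (y a b : Int) (h : a < b) :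
    altYearSum monthly y a b = altVal monthly y a + altYearSum monthly y (a + 1) b := by
  unfold altYearSum
  rw [PySem.List.pyRange_one_cons h]
  simp

theorem altYearSum_nil (monthly : List (String × Option Int)) (y a b : Int) (h : b ≤ a) :
    altYearSum monthly y a b = 0 := by
  unfold altYearSum
  rw [pyRange_nil h]
  simp

theorem altYearSum_singleton (monthly : List (String × Option Int)) (y a : Int) :
    altYearSum monthly y a (a + 1) = altVal monthly y a := by
  rw [altYearSum_cons monthly y a (a + 1) (by omega), altYearSum_nil monthly y (a + 1) (a + 1) le_rfl]
  ring

-- one step of the loop, on segSum's side (months in the loop state stay ≤ 12)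
theorem segSum_step (monthly : List (String × Option Int)) (year_end month_end y m : Int)
    (hme : month_end ≤ 12) (hm : m ≤ 12)
    (hcond : y < year_end ∨ (y = year_end ∧ m ≤ month_end)) :
    segSum monthly year_end month_end y m
      = altVal monthly y m
        + (if m + 1 > 12 then segSum monthly year_end month_end (y + 1) 1
           else segSum monthly year_end month_end y (m + 1)) := by
  by_cases h12 : m + 1 > 12
  · -- m = 12: the month wraps, the current year ends with month m
    have hm12 : m = 12 := by omega
    simp only [if_pos h12]
    rcases hcond with hy | ⟨hy, hmm⟩
    · -- y < year_end
      unfold segSum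
      rw [if_pos hy]
      rw [hm12, show (13 : Int) = 12 + 1 from rfl, altYearSum_singleton]
      by_cases hy1 : y + 1 < year_end
      · rw [if_pos hy1, PySem.List.pyRange_one_cons (by omega)]
        simp only [List.map_cons, List.sum_cons]
        ring
      · have hy1e : y + 1 = year_end := by omega
        rw [if_neg hy1, pyRange_nil (by omega)]
        by_cases hme1 : (1 : Int) ≤ month_end
        · rw [if_pos ⟨hy1e, hme1⟩, hy1e]
          simp
        · rw [if_neg (by tauto)]
          rw [altYearSum_nil monthly year_end 1 (month_end + 1) (by omega)]
          simp
    · -- y = year_end, 12 = m ≤ month_end ≤ 12, so month_end = 12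
      have hme12 : month_end = 12 := by omega
      unfold segSum
      rw [if_neg (by omega), if_pos ⟨hy, hmm⟩, if_neg (by omega), if_neg (by omega)]
      rw [hm12, hme12, show (12 : Int) + 1 = 12 + 1 from rfl, altYearSum_singleton]
      ring
  · -- m ≤ 11: peel month m off the current year's range
    simp only [if_neg h12]
    rcases hcond with hy | ⟨hy, hmm⟩
    · unfold segSum
      rw [if_pos hy, if_pos hy]
      rw [altYearSum_cons monthly y m 13 (by omega)]
      ring
    · unfold segSum
      rw [if_neg (by omega), if_pos ⟨hy, hmm⟩, if_neg (by omega)]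
      by_cases hm1 : m + 1 ≤ month_end
      · rw [if_pos ⟨hy, hm1⟩, altYearSum_cons monthly y m (month_end + 1) (by omega)]
      · rw [if_neg (by tauto)]
        have : month_end = m := by omega
        rw [this, altYearSum_singleton]
        ring

theorem sumMonthsLoop_eq_segSum (monthly : List (String × Option Int))
    (year_end month_end : Int) (hme : month_end ≤ 12) : ∀ (fuel : Nat) (total y m : Int),
    m ≤ 12 →
    (year_end + 1 - y).toNat * 14 + (13 - m).toNat ≤ fuel →
    sumMonthsLoop monthly year_end month_end fuel total y m
      = total + segSum monthly year_end month_end y m := by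
  intro fuel
  induction fuel with
  | zero =>
    intro total y m hm hk
    -- fuel 0 forces y > year_end, so both sides are 'total'
    unfold sumMonthsLoop segSum
    rw [if_neg (by omega), if_neg (by omega)]
    ring
  | succ fuel ih =>
    intro total y m hm hk
    rw [sumMonthsLoop]
    by_cases hcond : y < year_end ∨ (y = year_end ∧ m ≤ month_end)
    · rw [if_pos hcond]
      have hstep := segSum_step monthly year_end month_end y m hme hm hcond
      have htot : (match (PySem.Dict.mk monthly).get? (monthKey y m) with
          | some (some v) => total + v
          | _ => total) = total + altVal monthly y m := by
        unfold altVal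
        rcases (PySem.Dict.mk monthly).get? (monthKey y m) with _ | (_ | v) <;> simp
      by_cases h12 : m + 1 > 12
      · rw [if_pos h12, htot,
          ih (total + altVal monthly y m) (y + 1) 1 (by omega) (by omega), hstep, if_pos h12]
        ring
      · rw [if_neg h12, htot,
          ih (total + altVal monthly y m) y (m + 1) (by omega) (by omega), hstep, if_neg h12]
        ring
    · rw [if_neg hcond]
      unfold segSum
      rw [if_neg (by tauto), if_neg (by tauto)]
      ring

-- B's three-way case split is segSum at the initial state
theorem alt_eq_segSum (monthly : List (String × Option Int))
    (year_start month_start year_end month_end : Int) :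
    sum_months_py_alt monthly year_start month_start year_end month_end
      = segSum monthly year_end month_end year_start month_start := by
  unfold sum_months_py_alt segSum
  by_cases h0 : year_start > year_end ∨ (year_start = year_end ∧ month_start > month_end)
  · rw [if_pos h0, if_neg (by omega), if_neg (by omega)]
  · rw [if_neg h0]
    by_cases heq : year_start = year_end
    · rw [if_pos heq, if_neg (by omega), if_pos ⟨heq, by omega⟩]
    · rw [if_neg heq, if_pos (by omega)]
      simp only [PySem.List.foldl_add]

-- ===== VERDICT (by name: the statement is the Claim_ definition above) =====
theorem sum_months_py_spec : Claim_equal_sum_months_py := by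
  intro monthly year_start month_start year_end month_end _ hpre
  unfold Spec_sum_months_py sum_months_py
  rw [sumMonthsLoop_eq_segSum monthly year_end month_end hpre.2
    ((year_end + 1 - year_start).toNat * 14 + (13 - month_start).toNat)
    0 year_start month_start hpre.1 le_rfl, alt_eq_segSum]
  ring
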